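-- pv_equiv track=rewrite | github.com/StoicaDragos2001/python-labs | python_lab2/main.py | exercise12
-- ===== SOURCE A (Python) =====
-- def exercise12(words):
--     rhymes = {}
--     result = []
--     for word in words:
--         last2 = word[-2:]
--         if last2 not in rhymes:
--             rhymes[last2] = [word]
--         else:
--             rhymes[last2].append(word)
--     for last2, words in rhymes.items():
--         result.append(words)
--     return result
-- ===== SOURCE B (Python) =====
-- def exercise12(words):
--     seen = []
--     for w in words:
--         k = w[-2:]
--         if k not in seen:
--             seen.append(k)
--     return [[w for w in words if w[-2:] == k] for k in seen]
-- ===== Notes on version B (the rewrite author's own statement) =====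
-- stated objective: alternative
-- what changed: Replaces the dict-of-buckets single pass with an ordered distinct-suffix pass followed by one filter of the whole list per distinct suffix (group-by-filter idiom); no dict is built.
import Mathlib
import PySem

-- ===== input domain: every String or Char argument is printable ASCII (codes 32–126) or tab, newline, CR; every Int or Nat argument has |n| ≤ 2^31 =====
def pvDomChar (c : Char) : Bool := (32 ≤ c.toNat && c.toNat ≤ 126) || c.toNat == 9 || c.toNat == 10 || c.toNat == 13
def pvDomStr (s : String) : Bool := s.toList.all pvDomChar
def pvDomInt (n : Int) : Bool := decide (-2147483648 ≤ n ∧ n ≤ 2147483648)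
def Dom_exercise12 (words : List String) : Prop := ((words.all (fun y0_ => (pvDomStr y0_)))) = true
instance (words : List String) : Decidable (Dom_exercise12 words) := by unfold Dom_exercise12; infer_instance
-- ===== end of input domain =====

-- B replaces A's dict-of-buckets single pass with an ordered distinct-suffix pass
-- plus one filter of the full list per distinct suffix (alternative decomposition, not faster).
-- ===== PORT A =====
-- word[-2:]
def pvSuf (w : String) : String := PySem.Str.slice w (some (-2)) none

def exercise12 (words : List String) : List (List String) :=
  let rhymes : PySem.Dict String (List String) :=
    words.foldl (fun d w =>
      let last2 := pvSuf w
      if !(d.contains last2) then d.insert last2 [w]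
      else d.modify last2 [] (fun ws => ws ++ [w])) PySem.Dict.empty
  rhymes.items.foldl (fun result p => result ++ [p.2]) []

-- ===== PORT B =====
def exercise12_alt (words : List String) : List (List String) :=
  let seen : List String :=
    words.foldl (fun s w => if pvSuf w ∈ s then s else s ++ [pvSuf w]) []
  seen.map (fun k => words.filter (fun w => pvSuf w == k))

-- ===== PRECONDITION & SPEC =====
def Spec_exercise12 (words : List String) (out : List (List String)) : Prop := out = exercise12_alt words
instance (words : List String) (out : List (List String)) : Decidable (Spec_exercise12 words out) := by unfold Spec_exercise12; infer_instance

-- ===== CLAIM (what is proved, stated in full; the proofs are below) =====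
def Claim_equal_exercise12 : Prop := ∀ (words : List String), Dom_exercise12 words → Spec_exercise12 words (exercise12 words)

-- ===== LEMMAS AND PROOFS =====

-- A's if/else step is exactly a modify with default []
theorem pv_step_eq (d : PySem.Dict String (List String)) (w : String) :
    (if !(d.contains (pvSuf w)) then d.insert (pvSuf w) [w]
     else d.modify (pvSuf w) [] (fun ws => ws ++ [w]))
    = d.modify (pvSuf w) [] (fun ws => ws ++ [w]) := by
  by_cases h : d.contains (pvSuf w)
  · simp [h]
  · simp only [Bool.not_eq_true] at h
    simp [h, PySem.Dict.modify, PySem.Dict.getD_of_not_contains d [] h]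

-- B's seen-accumulator is the ordered set of suffixes
theorem pv_seen_eq (words : List String) :
    words.foldl (fun s w => if pvSuf w ∈ s then s else s ++ [pvSuf w]) []
    = PySem.Set.ofList (words.map pvSuf) := by
  rw [show PySem.Set.ofList (words.map pvSuf)
        = PySem.Set.update [] (words.map pvSuf) from rfl,
      PySem.Set.update_map_eq_foldl_add]
  apply PySem.List.foldl_congr_mem
  intro s w _
  simp [PySem.Set.add_eq_ite]

-- ===== VERDICT (by name: the statement is the Claim_ definition above) =====
theorem exercise12_spec : Claim_equal_exercise12 := by
  intro words _
  unfold Spec_exercise12 exercise12 exercise12_alt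
  simp only [pv_seen_eq]
  have hstep : words.foldl (fun d w =>
      let last2 := pvSuf w
      if !(d.contains last2) then d.insert last2 [w]
      else d.modify last2 [] (fun ws => ws ++ [w])) PySem.Dict.empty
      = (words.map (fun w => (pvSuf w, w))).foldl
          (fun d p => d.modify p.1 [] (fun ws => ws ++ [p.2])) PySem.Dict.empty := by
    rw [List.foldl_map]
    exact PySem.List.foldl_congr_mem _ _ _ _ (fun d w _ => pv_step_eq d w)
  rw [hstep]
  set d := (words.map (fun w => (pvSuf w, w))).foldl
      (fun d p => d.modify p.1 [] (fun ws => ws ++ [p.2])) PySem.Dict.empty with hd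
  have hnd : d.keys.Nodup := by
    rw [hd, List.foldl_map]
    exact PySem.Dict.nodup_keys_foldl_modify_key words pvSuf []
      (fun _ w ws => ws ++ [w]) PySem.Dict.empty (by simp)
  have hkeys : d.keys = PySem.Set.ofList (words.map pvSuf) := by
    rw [hd, List.foldl_map]
    rw [PySem.Dict.keys_foldl_modify_key words pvSuf [] (fun _ w ws => ws ++ [w])
      PySem.Dict.empty]
    simp [PySem.Dict.keys_empty]
    rfl
  rw [PySem.List.foldl_append_singleton_eq_map (fun p => p.2) d.items []]
  have hvals : d.items.map (fun p => p.2) = d.values := rfl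
  rw [hvals, PySem.Dict.values_eq_map_keys d hnd [], hkeys]
  apply List.map_congr_left
  intro k _
  rw [hd, PySem.Dict.getD_foldl_modify_append]
  simp [List.filter_map, Function.comp_def]
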